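-- pv_equiv track=rewrite | github.com/dainan78910jj/python_ai_2025_daily_study | 20250512lab.py | sequence_123_check
-- ===== SOURCE A (Python) =====
-- def sequence_123_check(list):
--     if (len(list) < 3):
--         return False
--     else:
--         for i in range(len(list) - 2):
--             if (list[i] == 1) and (list[i + 1] == 2) and (list[i + 2] == 3):
--                 return True
--         return False
-- ===== SOURCE B (Python) =====
-- def sequence_123_check(list):
--     progress = 0
--     for x in list:
--         if progress == 2 and x == 3:
--             return True
--         elif progress == 1 and x == 2:
--             progress = 2
--         elif x == 1:
--             progress = 1
--         else:
--             progress = 0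
--     return False
-- ===== Notes on version B (the rewrite author's own statement) =====
-- stated objective: alternative
-- what changed: Replaces the windowed triple-index scan (length guard plus three list[] lookups per position) with a single forward pass maintaining a DFA progress counter of how much of the target pattern has been matched.
import Mathlib
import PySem

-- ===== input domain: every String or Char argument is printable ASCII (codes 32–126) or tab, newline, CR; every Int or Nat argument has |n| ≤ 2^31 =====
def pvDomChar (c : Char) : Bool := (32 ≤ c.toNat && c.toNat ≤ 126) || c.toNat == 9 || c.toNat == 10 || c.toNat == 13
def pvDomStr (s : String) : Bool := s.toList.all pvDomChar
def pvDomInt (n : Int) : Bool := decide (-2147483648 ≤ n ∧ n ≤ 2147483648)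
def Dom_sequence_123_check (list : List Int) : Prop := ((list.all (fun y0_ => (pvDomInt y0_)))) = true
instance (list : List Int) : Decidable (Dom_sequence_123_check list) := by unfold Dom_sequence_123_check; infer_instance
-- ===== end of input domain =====

-- B replaces A's windowed triple-index scan with a single pass keeping a DFA progress counter.

-- ===== PORT A =====
-- the 'for i in range(len(list) - 2)' loop with early 'return True'
def seqA_loop (l : List Int) : List Int → Bool
  | [] => false
  | i :: rest =>
    if (PySem.List.pyGet? l i == some 1) && (PySem.List.pyGet? l (i + 1) == some 2)
        && (PySem.List.pyGet? l (i + 2) == some 3) then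
      true
    else
      seqA_loop l rest

def sequence_123_check (list : List Int) : Bool :=
  if (list.length : Int) < 3 then false
  else seqA_loop list (PySem.List.pyRange 0 ((list.length : Int) - 2) 1)

-- ===== PORT B =====
-- 'progress' holds how much of [1,2,3] has been matched so far
def seqB_loop : Int → List Int → Bool
  | _, [] => false
  | p, x :: rest =>
    if p == 2 && x == 3 then true
    else if p == 1 && x == 2 then seqB_loop 2 rest
    else if x == 1 then seqB_loop 1 rest
    else seqB_loop 0 rest

def sequence_123_check_alt (list : List Int) : Bool :=
  seqB_loop 0 list

-- ===== PRECONDITION & SPEC =====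
def Spec_sequence_123_check (list : List Int) (out : Bool) : Prop := out = sequence_123_check_alt list
instance (list : List Int) (out : Bool) : Decidable (Spec_sequence_123_check list out) := by unfold Spec_sequence_123_check; infer_instance

-- ===== CLAIM (what is proved, stated in full; the proofs are below) =====
def Claim_equal_sequence_123_check : Prop := ∀ (list : List Int), Dom_sequence_123_check list → Spec_sequence_123_check list (sequence_123_check list)

-- ===== LEMMAS AND PROOFS =====

-- reference predicate: the list contains 1,2,3 contiguously
def hasT : List Int → Bool
  | a :: b :: c :: r => (a == 1 && b == 2 && c == 3) || hasT (b :: c :: r)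
  | _ => false

-- does the list START with 1,2,3?
def pfx : List Int → Bool
  | a :: b :: c :: _ => a == 1 && b == 2 && c == 3
  | _ => false

theorem hasT_cons (a : Int) (l : List Int) : hasT (a :: l) = (pfx (a :: l) || hasT l) := by
  match l with
  | [] => simp [hasT, pfx]
  | [b] => simp [hasT, pfx]
  | b :: c :: r => simp [hasT, pfx]

theorem pfx_cons_ne {x : Int} (l : List Int) (h : x ≠ 1) : pfx (x :: l) = false := by
  match l with
  | [] => simp [pfx]
  | [b] => simp [pfx]
  | b :: c :: r => simp [pfx, h]

-- ---- A equals hasT ----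

theorem seqA_shift (x : Int) (rest : List Int) (idxs : List Int)
    (h : ∀ i ∈ idxs, 0 ≤ i) :
    seqA_loop (x :: rest) (idxs.map (· + 1)) = seqA_loop rest idxs := by
  induction idxs with
  | nil => rfl
  | cons i t ih =>
    have hi : 0 ≤ i := h i (by simp)
    have e1 : PySem.List.pyGet? (x :: rest) (i + 1) = PySem.List.pyGet? rest i := by
      have : i = ((i.toNat : Nat) : Int) := by omega
      rw [this, PySem.List.pyGet?_cons_succ]
    have e2 : PySem.List.pyGet? (x :: rest) (i + 1 + 1) = PySem.List.pyGet? rest (i + 1) := by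
      have : i + 1 = (((i + 1).toNat : Nat) : Int) := by omega
      rw [this, PySem.List.pyGet?_cons_succ]
    have e3 : PySem.List.pyGet? (x :: rest) (i + 1 + 2) = PySem.List.pyGet? rest (i + 2) := by
      have h3 : i + 1 + 2 = (((i + 2).toNat : Nat) : Int) + 1 := by omega
      rw [h3, PySem.List.pyGet?_cons_succ, show (((i + 2).toNat : Nat) : Int) = i + 2 from by omega]
    simp only [List.map_cons, seqA_loop, e1, e2, e3]
    rw [ih (fun j hj => h j (by simp [hj]))]

theorem pyRange_succ_shift (n : Int) (hn : 0 ≤ n) :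
    PySem.List.pyRange 0 (n + 1) 1 = 0 :: (PySem.List.pyRange 0 n 1).map (· + 1) := by
  rw [PySem.List.pyRange_one_cons (by omega)]
  congr 1
  rw [PySem.List.pyRange_one, PySem.List.pyRange_one]
  simp only [List.map_map]
  rw [show (n + 1 - (0 + 1)).toNat = (n - 0).toNat from by omega]
  apply List.map_congr_left
  intro k _
  simp; ring

theorem seqA_eq_hasT (l : List Int) :
    seqA_loop l (PySem.List.pyRange 0 ((l.length : Int) - 2) 1) = hasT l := by
  induction l with
  | nil => rfl
  | cons x rest ih =>
    match rest with
    | [] => rfl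
    | [y] => rfl
    | y :: z :: r =>
      have hlen : ((x :: y :: z :: r).length : Int) - 2 = ((r.length : Int) + 1) := by
        simp; omega
      have hlen2 : ((y :: z :: r).length : Int) - 2 = (r.length : Int) := by
        simp; omega
      rw [hlen, pyRange_succ_shift _ (by positivity)]
      have hmem : ∀ i ∈ PySem.List.pyRange 0 (r.length : Int) 1, 0 ≤ i := by
        intro i hi
        exact (PySem.List.mem_pyRange_one.mp hi).1
      simp only [seqA_loop]
      rw [seqA_shift x (y :: z :: r) _ hmem, ← hlen2, ih]
      have g0 : PySem.List.pyGet? (x :: y :: z :: r) 0 = some x := by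
        simp [PySem.List.pyGet?_zero]
      have g1 : PySem.List.pyGet? (x :: y :: z :: r) 1 = some y := by
        have : (1 : Int) = ((1 : Nat) : Int) := rfl
        rw [this, PySem.List.pyGet?_natCast]; rfl
      have g2 : PySem.List.pyGet? (x :: y :: z :: r) 2 = some z := by
        have : (2 : Int) = ((2 : Nat) : Int) := rfl
        rw [this, PySem.List.pyGet?_natCast]; rfl
      rw [show (0 : Int) + 1 = 1 by ring, show (0 : Int) + 2 = 2 by ring, g0, g1, g2]
      simp only [hasT]
      by_cases hx : x = 1 <;> by_cases hy : y = 2 <;> by_cases hz : z = 3 <;>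
        simp [hx, hy, hz]

theorem a_eq_hasT (l : List Int) : sequence_123_check l = hasT l := by
  unfold sequence_123_check
  split
  · rename_i h
    match l with
    | [] => rfl
    | [a] => rfl
    | [a, b] => rfl
    | a :: b :: c :: r => simp at h; omega
  · exact seqA_eq_hasT l

-- ---- B equals hasT ----

theorem pfx_snd_ne (a : Int) {b : Int} (l : List Int) (h : b ≠ 2) : pfx (a :: b :: l) = false := by
  match l with
  | [] => simp [pfx]
  | c :: t => simp [pfx, h]

theorem seqB_inv (l : List Int) :
    seqB_loop 0 l = hasT l ∧ seqB_loop 1 l = hasT (1 :: l) ∧ seqB_loop 2 l = hasT (1 :: 2 :: l) := by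
  induction l with
  | nil => refine ⟨rfl, rfl, rfl⟩
  | cons x r ih =>
    obtain ⟨i0, i1, i2⟩ := ih
    by_cases h1 : x = 1
    · subst h1
      refine ⟨?_, ?_, ?_⟩
      · rw [show seqB_loop 0 (1 :: r) = seqB_loop 1 r from by simp [seqB_loop], i1]
      · rw [show seqB_loop 1 (1 :: r) = seqB_loop 1 r from by simp [seqB_loop], i1,
            hasT_cons 1 (1 :: r), pfx_snd_ne _ _ (by norm_num)]
        simp
      · rw [show seqB_loop 2 (1 :: r) = seqB_loop 1 r from by simp [seqB_loop], i1,
            show hasT (1 :: 2 :: 1 :: r)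
              = (((1:Int) == 1 && (2:Int) == 2 && (1:Int) == 3) || hasT (2 :: 1 :: r)) from rfl,
            hasT_cons 2 (1 :: r), pfx_cons_ne _ (by norm_num)]
        simp
    · by_cases h2 : x = 2
      · subst h2
        refine ⟨?_, ?_, ?_⟩
        · rw [show seqB_loop 0 (2 :: r) = seqB_loop 0 r from by simp [seqB_loop], i0,
              hasT_cons 2 r, pfx_cons_ne _ (by norm_num)]
          simp
        · rw [show seqB_loop 1 (2 :: r) = seqB_loop 2 r from by simp [seqB_loop], i2]
        · rw [show seqB_loop 2 (2 :: r) = seqB_loop 0 r from by simp [seqB_loop], i0,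
              show hasT (1 :: 2 :: 2 :: r)
                = (((1:Int) == 1 && (2:Int) == 2 && (2:Int) == 3) || hasT (2 :: 2 :: r)) from rfl,
              hasT_cons 2 (2 :: r), pfx_cons_ne _ (by norm_num),
              hasT_cons 2 r, pfx_cons_ne _ (by norm_num)]
          simp
      · by_cases h3 : x = 3
        · subst h3
          refine ⟨?_, ?_, ?_⟩
          · rw [show seqB_loop 0 (3 :: r) = seqB_loop 0 r from by simp [seqB_loop], i0,
                hasT_cons 3 r, pfx_cons_ne _ (by norm_num)]
            simp
          · rw [show seqB_loop 1 (3 :: r) = seqB_loop 0 r from by simp [seqB_loop], i0,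
                hasT_cons 1 (3 :: r), pfx_snd_ne _ _ (by norm_num),
                hasT_cons 3 r, pfx_cons_ne _ (by norm_num)]
            simp
          · rw [show seqB_loop 2 (3 :: r) = true from by simp [seqB_loop],
                show hasT (1 :: 2 :: 3 :: r)
                  = (((1:Int) == 1 && (2:Int) == 2 && (3:Int) == 3) || hasT (2 :: 3 :: r)) from rfl]
            simp
        · refine ⟨?_, ?_, ?_⟩
          · rw [show seqB_loop 0 (x :: r) = seqB_loop 0 r from by simp [seqB_loop, h1], i0,
                hasT_cons x r, pfx_cons_ne _ h1]
            simp
          · rw [show seqB_loop 1 (x :: r) = seqB_loop 0 r from by simp [seqB_loop, h1, h2], i0,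
                hasT_cons 1 (x :: r), pfx_snd_ne _ _ h2,
                hasT_cons x r, pfx_cons_ne _ h1]
            simp
          · rw [show seqB_loop 2 (x :: r) = seqB_loop 0 r from by simp [seqB_loop, h1, h3], i0,
                show hasT (1 :: 2 :: x :: r)
                  = (((1:Int) == 1 && (2:Int) == 2 && x == 3) || hasT (2 :: x :: r)) from rfl,
                hasT_cons 2 (x :: r), pfx_snd_ne _ _ h2,
                hasT_cons x r, pfx_cons_ne _ h1]
            simp [h3]

theorem b_eq_hasT (l : List Int) : sequence_123_check_alt l = hasT l := (seqB_inv l).1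

-- ===== VERDICT (by name: the statement is the Claim_ definition above) =====
theorem sequence_123_check_spec : Claim_equal_sequence_123_check := by
  intro l _
  unfold Spec_sequence_123_check
  rw [a_eq_hasT, b_eq_hasT]
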